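-- pv_equiv track=rewrite | github.com/Iced2000/Asteriated_Grail | character/utils.py | getTotalJewelCombination
-- ===== SOURCE A (Python) =====
-- def checkJewel(jewel, target, force=False):
--     if force:
--         return jewel[0] >= target[0] and jewel[1] >= target[1]
--     else:
--         return jewel[0] >= target[0] and jewel[0] + jewel[1] >= target[0] + target[1]
--
-- def getTotalJewelCombination(jewel, num, force=False):
--     res = []
--     startPoint = 1 if not force else num
--     for i in range(startPoint, num + 1):
--         for j in range(i + 1):
--             tmp = (j, i - j)
--             if checkJewel(jewel, tmp, force=True):
--                 res.append(tmp)
--     return res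
-- ===== SOURCE B (Python) =====
-- def getTotalJewelCombination(jewel, num, force=False):
--     # Per i, the valid j form the interval [max(0, i - jewel[1]), min(i, jewel[0])]:
--     # emit it directly instead of testing every j.
--     j0, j1 = jewel[0], jewel[1]
--     res = []
--     start = num if force else 1
--     for i in range(start, num + 1):
--         res.extend((j, i - j) for j in range(max(0, i - j1), min(i, j0) + 1))
--     return res
-- ===== Notes on version B (the rewrite author's own statement) =====
-- stated objective: faster
-- what changed: Instead of scanning every j in 0..i and testing checkJewel, B computes per i the closed-form valid interval [max(0,i-jewel[1]), min(i,jewel[0])] and emits exactly those pairs.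
-- outside the precondition, e.g. on getTotalJewelCombination([], 0, False): A returns [], B raises IndexError
import Mathlib
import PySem

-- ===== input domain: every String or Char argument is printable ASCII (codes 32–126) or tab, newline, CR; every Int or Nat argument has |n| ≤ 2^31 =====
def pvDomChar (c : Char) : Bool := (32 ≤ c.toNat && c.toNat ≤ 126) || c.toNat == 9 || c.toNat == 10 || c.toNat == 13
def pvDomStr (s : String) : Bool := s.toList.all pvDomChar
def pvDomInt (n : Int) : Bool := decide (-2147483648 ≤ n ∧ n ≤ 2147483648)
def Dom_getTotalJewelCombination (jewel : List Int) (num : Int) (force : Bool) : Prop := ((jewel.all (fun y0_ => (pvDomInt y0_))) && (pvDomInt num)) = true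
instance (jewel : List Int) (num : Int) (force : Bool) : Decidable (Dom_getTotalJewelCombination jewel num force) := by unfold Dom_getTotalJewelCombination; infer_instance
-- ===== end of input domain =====

-- B replaces A's inner brute-force scan (test every j in 0..i) by directly emitting the
-- closed-form valid interval [max(0, i-jewel[1]), min(i, jewel[0])] per i (faster).


-- ===== PORT A =====
-- jewel[k] is ported as pyGetD jewel k 0: exact under Pre_ (jewel has at least 2 elements).
def pyCheckJewel (jewel : List Int) (t0 t1 : Int) (force : Bool) : Bool :=
  if force then
    decide (PySem.List.pyGetD jewel 0 0 ≥ t0) && decide (PySem.List.pyGetD jewel 1 0 ≥ t1)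
  else
    decide (PySem.List.pyGetD jewel 0 0 ≥ t0) &&
      decide (PySem.List.pyGetD jewel 0 0 + PySem.List.pyGetD jewel 1 0 ≥ t0 + t1)

def getTotalJewelCombination (jewel : List Int) (num : Int) (force : Bool) : List (List Int) :=
  let startPoint : Int := if !force then 1 else num
  (PySem.List.pyRange startPoint (num + 1) 1).foldl (fun res i =>
    (PySem.List.pyRange 0 (i + 1) 1).foldl (fun res j =>
      if pyCheckJewel jewel j (i - j) true then res ++ [[j, i - j]] else res) res) []

-- ===== PORT B =====
def getTotalJewelCombination_alt (jewel : List Int) (num : Int) (force : Bool) : List (List Int) :=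
  let j0 := PySem.List.pyGetD jewel 0 0
  let j1 := PySem.List.pyGetD jewel 1 0
  let start : Int := if force then num else 1
  (PySem.List.pyRange start (num + 1) 1).foldl (fun res i =>
    res ++ (PySem.List.pyRange (max 0 (i - j1)) (min i j0 + 1) 1).map (fun j => [j, i - j])) []

-- ===== PRECONDITION & SPEC =====
-- Pre_ excludes jewel lists shorter than 2: Python A raises IndexError on them whenever the
-- loop body runs, and B (which reads jewel[0], jewel[1] up front) raises there even in the
-- degenerate cases where A's loops never run and A returns [].
def Pre_getTotalJewelCombination (jewel : List Int) (num : Int) (force : Bool) : Prop :=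
  2 ≤ jewel.length
instance (jewel : List Int) (num : Int) (force : Bool) : Decidable (Pre_getTotalJewelCombination jewel num force) := by unfold Pre_getTotalJewelCombination; infer_instance
def pvWitness_getTotalJewelCombination : List Int × Int × Bool := ([2, 3], 4, false)

def Spec_getTotalJewelCombination (jewel : List Int) (num : Int) (force : Bool) (out : List (List Int)) : Prop := out = getTotalJewelCombination_alt jewel num force
instance (jewel : List Int) (num : Int) (force : Bool) (out : List (List Int)) : Decidable (Spec_getTotalJewelCombination jewel num force out) := by unfold Spec_getTotalJewelCombination; infer_instance

-- ===== CLAIM (what is proved, stated in full; the proofs are below) =====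
def Claim_equal_getTotalJewelCombination : Prop := ∀ (jewel : List Int) (num : Int) (force : Bool), Dom_getTotalJewelCombination jewel num force → Pre_getTotalJewelCombination jewel num force → Spec_getTotalJewelCombination jewel num force (getTotalJewelCombination jewel num force)

-- ===== LEMMAS AND PROOFS =====

-- Filtering an integer range by an interval [L, U] leaves the clamped range.
theorem pvFilterRangeInterval (L U : Int) : ∀ (n : Nat) (a b : Int), (b - a).toNat ≤ n →
    (PySem.List.pyRange a b 1).filter (fun j => decide (L ≤ j ∧ j ≤ U)) =
      PySem.List.pyRange (max a L) (min b (U + 1)) 1 := by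
  intro n
  induction n with
  | zero =>
    intro a b h
    have hba : b ≤ a := by omega
    rw [PySem.List.pyRange_one_eq_nil hba, PySem.List.pyRange_one_eq_nil (by omega)]
    rfl
  | succ m ih =>
    intro a b h
    by_cases hab : a < b
    · rw [PySem.List.pyRange_one_cons hab]
      by_cases hin : L ≤ a ∧ a ≤ U
      · have hmax : max a L = a := by omega
        have h1 : max (a + 1) L = a + 1 := by omega
        rw [List.filter_cons_of_pos (by simpa using hin), ih (a + 1) b (by omega), h1, hmax]
        exact (PySem.List.pyRange_one_cons (by omega)).symm
      · rw [List.filter_cons_of_neg (by simpa using hin), ih (a + 1) b (by omega)]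
        by_cases hL : L ≤ a
        · -- then a > U, so both ranges are empty
          rw [PySem.List.pyRange_one_eq_nil (by omega), PySem.List.pyRange_one_eq_nil (by omega)]
        · have : max (a + 1) L = max a L := by omega
          rw [this]
    · rw [PySem.List.pyRange_one_eq_nil (by omega), PySem.List.pyRange_one_eq_nil (by omega)]
      rfl

theorem pvInnerEq (j0 j1 i : Int) (res : List (List Int)) :
    (PySem.List.pyRange 0 (i + 1) 1).foldl (fun res j =>
        if decide (j0 ≥ j) && decide (j1 ≥ i - j) then res ++ [[j, i - j]] else res) res =
      res ++ (PySem.List.pyRange (max 0 (i - j1)) (min i j0 + 1) 1).map (fun j => [j, i - j]) := by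
  rw [PySem.List.foldl_append_if (fun j => decide (j0 ≥ j) && decide (j1 ≥ i - j))
      (fun j => [j, i - j])]
  congr 1
  have hp : (PySem.List.pyRange 0 (i + 1) 1).filter
      (fun j => decide (j0 ≥ j) && decide (j1 ≥ i - j)) =
      (PySem.List.pyRange 0 (i + 1) 1).filter (fun j => decide (i - j1 ≤ j ∧ j ≤ j0)) := by
    apply List.filter_congr
    intro j _
    by_cases h1 : i - j1 ≤ j <;> by_cases h2 : j ≤ j0 <;>
      simp [h1, h2] <;> omega
  rw [hp, pvFilterRangeInterval (i - j1) j0 (i + 1 - 0).toNat 0 (i + 1) (by omega)]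
  have : min (i + 1) (j0 + 1) = min i j0 + 1 := by omega
  rw [this]

-- ===== VERDICT (by name: the statement is the Claim_ definition above) =====
theorem getTotalJewelCombination_spec : Claim_equal_getTotalJewelCombination := by
  intro jewel num force _ _
  unfold Spec_getTotalJewelCombination getTotalJewelCombination getTotalJewelCombination_alt
  simp only [pyCheckJewel, if_true]
  have hstart : (if !force then (1 : Int) else num) = if force then num else 1 := by
    cases force <;> rfl
  rw [hstart]
  congr 1
  funext res i
  exact pvInnerEq (PySem.List.pyGetD jewel 0 0) (PySem.List.pyGetD jewel 1 0) i res
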